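-- pv_equiv track=rewrite | github.com/mohammadshokriacct/Recomender-System | Collaborate_Filter.py | common_items
-- ===== SOURCE A (Python) =====
-- def common_items(user1_data, user2_data):
--     result = []
--     ht = {}
--     for (movie, rating) in user1_data.items():
--         ht.setdefault(movie, 0)
--         ht[movie] += 1
--     for (movie, rating) in user2_data.items():
--         ht.setdefault(movie, 0)
--         ht[movie] += 1
--     for (k, v) in ht.items():
--         if v == 2:
--             result.append(k)
--     return result
-- ===== SOURCE B (Python) =====
-- def common_items(user1_data, user2_data):
--     return [k for k in user1_data if k in user2_data]
-- ===== Notes on version B (the rewrite author's own statement) =====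
-- stated objective: simpler
-- what changed: B drops A's intermediate count histogram (two populating passes plus a selection pass over the table) and computes the intersection in one direct filtering pass over user1_data, testing key membership in user2_data.
import Mathlib
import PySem

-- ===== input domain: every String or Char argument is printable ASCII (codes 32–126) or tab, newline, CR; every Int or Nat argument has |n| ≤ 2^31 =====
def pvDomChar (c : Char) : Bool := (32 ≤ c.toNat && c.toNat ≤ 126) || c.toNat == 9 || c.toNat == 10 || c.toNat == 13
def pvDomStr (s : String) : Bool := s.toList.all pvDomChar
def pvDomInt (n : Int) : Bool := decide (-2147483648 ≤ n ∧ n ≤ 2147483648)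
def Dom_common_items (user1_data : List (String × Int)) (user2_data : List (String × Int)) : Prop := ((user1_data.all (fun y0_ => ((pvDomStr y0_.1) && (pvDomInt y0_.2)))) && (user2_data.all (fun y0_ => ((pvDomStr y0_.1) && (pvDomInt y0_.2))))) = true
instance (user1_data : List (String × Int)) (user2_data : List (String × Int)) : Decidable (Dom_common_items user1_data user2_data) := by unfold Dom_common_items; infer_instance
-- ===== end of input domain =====

-- B replaces A's count-histogram (two populating passes + a selection pass) by a single
-- membership-filter pass over user1_data; objective: simpler, equal return value.

-- ===== PORT A =====
-- ht.setdefault(movie, 0); ht[movie] += 1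
def ciStep (ht : PySem.Dict String Int) (movie : String) : PySem.Dict String Int :=
  let ht' := ht.setdefault movie 0
  ht'.insert movie (ht'.getD movie 0 + 1)

def common_items (user1_data : List (String × Int)) (user2_data : List (String × Int)) : List String :=
  let ht := user1_data.foldl (fun ht p => ciStep ht p.1) PySem.Dict.empty
  let ht := user2_data.foldl (fun ht p => ciStep ht p.1) ht
  ht.items.foldl (fun result kv => if kv.2 == 2 then result ++ [kv.1] else result) []

-- ===== PORT B =====
-- [k for k in user1_data if k in user2_data]  (iterating a dict yields its keys)
def common_items_alt (user1_data : List (String × Int)) (user2_data : List (String × Int)) : List String :=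
  (user1_data.map Prod.fst).filter (fun k => (user2_data.map Prod.fst).contains k)

-- ===== PRECONDITION & SPEC =====
-- Pre_ requires each association list to have pairwise-distinct keys: the lists model
-- Python dicts, which cannot hold duplicate keys, so no other input reaches A.
def Pre_common_items (user1_data : List (String × Int)) (user2_data : List (String × Int)) : Prop :=
  (user1_data.map Prod.fst).Nodup ∧ (user2_data.map Prod.fst).Nodup
instance (user1_data : List (String × Int)) (user2_data : List (String × Int)) : Decidable (Pre_common_items user1_data user2_data) := by unfold Pre_common_items; infer_instance

def pvWitness_common_items : (List (String × Int)) × (List (String × Int)) :=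
  ([("a", 1), ("b", 2), ("c", 3)], [("b", 5), ("d", 4), ("a", 0)])

def Spec_common_items (user1_data : List (String × Int)) (user2_data : List (String × Int)) (out : List String) : Prop := out = common_items_alt user1_data user2_data
instance (user1_data : List (String × Int)) (user2_data : List (String × Int)) (out : List String) : Decidable (Spec_common_items user1_data user2_data out) := by unfold Spec_common_items; infer_instance

-- ===== CLAIM (what is proved, stated in full; the proofs are below) =====
def Claim_equal_common_items : Prop := ∀ (user1_data : List (String × Int)) (user2_data : List (String × Int)), Dom_common_items user1_data user2_data → Pre_common_items user1_data user2_data → Spec_common_items user1_data user2_data (common_items user1_data user2_data)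

-- ===== LEMMAS AND PROOFS =====

-- A's loop body (setdefault 0 then += 1) is exactly Dict.modify _ 0 (· + 1).
theorem ciStep_eq_modify (ht : PySem.Dict String Int) (k : String) :
    ciStep ht k = ht.modify k 0 (· + 1) := by
  unfold ciStep PySem.Dict.setdefault PySem.Dict.modify
  by_cases h : ht.contains k = true
  · simp [h]
  · simp only [Bool.not_eq_true] at h
    simp only [h, Bool.false_eq_true, if_false]
    have hmem : ∀ p ∈ ht.items, (p.1 == k) = false := by
      intro p hp
      by_contra hc
      simp only [Bool.not_eq_false] at hc
      have : ht.contains k = true := by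
        simp only [PySem.Dict.contains, List.any_eq_true]
        exact ⟨p, hp, hc⟩
      simp [this] at h
    have hg : (PySem.Dict.mk (ht.items ++ [(k, (0:Int))])).getD k 0 = 0 := by
      simp only [PySem.Dict.getD, PySem.Dict.get?, List.find?_append]
      rw [List.find?_eq_none.2 (by intro p hp; simp [hmem p hp])]
      simp
    rw [hg]
    have hgd : ht.getD k 0 = 0 := by
      simp only [PySem.Dict.getD, PySem.Dict.get?]
      rw [List.find?_eq_none.2 (by intro p hp; simp [hmem p hp])]
      simp
    rw [hgd]
    simp only [PySem.Dict.insert, PySem.Dict.contains] at *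
    simp only [h, Bool.false_eq_true, if_false]
    have hany : ((PySem.Dict.mk (ht.items ++ [(k, (0:Int))])).items.any fun p => p.1 == k) = true := by
      simp
    simp only [hany, if_true]
    congr 1
    rw [List.map_append]
    have hid : List.map (fun p => if (p.1 == k) = true then (k, (0:Int) + 1) else p) ht.items = ht.items := by
      calc List.map (fun p => if (p.1 == k) = true then (k, (0:Int) + 1) else p) ht.items
          = List.map id ht.items := List.map_congr_left (fun p hp => by simp [hmem p hp])
        _ = ht.items := List.map_id ht.items
    rw [hid]
    simp

theorem common_items_eq_counter_form (u1 u2 : List (String × Int)) :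
    common_items u1 u2 =
      ((PySem.Set.ofList (u1.map Prod.fst ++ u2.map Prod.fst)).filter
        (fun k => ((((u1.map Prod.fst ++ u2.map Prod.fst).count k : Int)) == 2))) := by
  unfold common_items
  simp only [ciStep_eq_modify]
  have h1 : ∀ (d : PySem.Dict String Int) (l : List (String × Int)),
      l.foldl (fun ht p => ht.modify p.1 0 (· + 1)) d
        = (l.map Prod.fst).foldl (fun ht k => ht.modify k 0 (· + 1)) d := by
    intro d l; rw [List.foldl_map]
  rw [h1, h1, ← List.foldl_append, ← PySem.Dict.counter_eq_foldl]
  rw [PySem.List.foldl_append_if (fun kv : String × Int => kv.2 == 2) Prod.fst]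
  rw [PySem.Dict.items_counter]
  rw [List.filter_map, List.map_map]
  simp [Function.comp_def]

theorem count_eq_two_iff (k1 k2 : List String) (h1 : k1.Nodup) (h2 : k2.Nodup)
    (k : String) (hk : k ∈ k1) :
    (((k1 ++ k2).count k : Int) == 2) = k2.contains k := by
  rw [List.count_append]
  rcases List.instDecidableMemOfLawfulBEq k k2 with hm | hm
  · have : k2.count k = 0 := List.count_eq_zero.2 hm
    simp [this, List.count_eq_one_of_mem h1 hk, hm]
  · have : k2.count k = 1 := List.count_eq_one_of_mem h2 hm
    simp [this, List.count_eq_one_of_mem h1 hk, hm]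

theorem common_items_spec' (u1 u2 : List (String × Int))
    (h1 : (u1.map Prod.fst).Nodup) (h2 : (u2.map Prod.fst).Nodup) :
    common_items u1 u2 = common_items_alt u1 u2 := by
  rw [common_items_eq_counter_form]
  set k1 := u1.map Prod.fst with hk1
  set k2 := u2.map Prod.fst with hk2
  rw [PySem.Set.ofList_append, PySem.Set.update_eq_append_filter,
      PySem.Set.ofList_eq_self_of_nodup _ h1, PySem.Set.ofList_eq_self_of_nodup _ h2]
  rw [List.filter_append]
  have hright : ((k2.filter (fun y => !PySem.Set.contains k1 y)).filter
      (fun k => (((k1 ++ k2).count k : Int) == 2))) = [] := by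
    rw [List.filter_eq_nil_iff]
    intro y hy
    have hy' := List.mem_filter.1 hy
    have hmem2 : y ∈ k2 := hy'.1
    have hnot1 : y ∉ k1 := by
      have := hy'.2; simpa [PySem.Set.contains_iff] using this
    rw [List.count_append]
    have c1 : k1.count y = 0 := List.count_eq_zero.2 hnot1
    have c2 : k2.count y = 1 := List.count_eq_one_of_mem h2 hmem2
    simp [c1, c2]
  rw [hright, List.append_nil]
  rw [List.filter_congr (fun k hk => count_eq_two_iff k1 k2 h1 h2 k hk)]
  rfl

-- ===== VERDICT (by name: the statement is the Claim_ definition above) =====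
theorem common_items_spec : Claim_equal_common_items := by
  intro u1 u2 _ hpre
  unfold Spec_common_items
  exact common_items_spec' u1 u2 hpre.1 hpre.2
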